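-- pv_equiv track=rewrite | github.com/nd-nuclear-theory/mcscript-ncci | ncci/utils.py | Nv_for_nuclide
-- ===== SOURCE A (Python) =====
-- def Nv_for_nuclide(nuclide):
--     """Calculate oscillator quantum number of valence shell for given nuclide.
--
--     Arguments:
--         nuclide (tuple): (Z,N) for nuclide
--
--     Returns:
--         Nv (int): oscilllator quantum number for valence shell
--     """
--
--     # each major shell eta=2*n+l (for a spin-1/2 fermion) contains (eta+1)*(eta+2) substates
--
--     Nv = 0
--     for species_index in (0,1):
--         num_particles = nuclide[species_index]
--         eta=0
--         while(num_particles>0):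
--             # discard particles in shell
--             shell_degeneracy = (eta+1)*(eta+2)
--             num_particles_in_shell = min(num_particles,shell_degeneracy)
--             num_particles -= num_particles_in_shell
--
--             # update Nv
--             Nv = max(Nv, eta)
--
--             # move to next shell
--             eta += 1
--
--     return Nv
-- ===== SOURCE B (Python) =====
-- def Nv_for_nuclide(nuclide):
--     """Calculate oscillator quantum number of valence shell for given nuclide.
--
--     B: finds the valence shell directly by binary search on the closed-form
--     cumulative capacity (eta+1)*(eta+2)*(eta+3)//3 instead of filling shells.
--     """
--     Nv = 0
--     for num_particles in nuclide:
--         if num_particles > 0: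
--             # smallest eta with (eta+1)*(eta+2)*(eta+3) >= 3*num_particles
--             lo, hi = 0, num_particles
--             while lo < hi:
--                 mid = (lo + hi) // 2
--                 if (mid + 1) * (mid + 2) * (mid + 3) >= 3 * num_particles:
--                     hi = mid
--                 else:
--                     lo = mid + 1
--             Nv = max(Nv, lo)
--     return Nv
-- ===== Notes on version B (the rewrite author's own statement) =====
-- stated objective: faster
-- what changed: Replaces the shell-by-shell filling loop (one iteration per occupied shell, subtracting each shell's degeneracy) by a direct binary search for the smallest eta whose closed-form cumulative capacity (eta+1)(eta+2)(eta+3)/3 reaches the particle number.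
import Mathlib
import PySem

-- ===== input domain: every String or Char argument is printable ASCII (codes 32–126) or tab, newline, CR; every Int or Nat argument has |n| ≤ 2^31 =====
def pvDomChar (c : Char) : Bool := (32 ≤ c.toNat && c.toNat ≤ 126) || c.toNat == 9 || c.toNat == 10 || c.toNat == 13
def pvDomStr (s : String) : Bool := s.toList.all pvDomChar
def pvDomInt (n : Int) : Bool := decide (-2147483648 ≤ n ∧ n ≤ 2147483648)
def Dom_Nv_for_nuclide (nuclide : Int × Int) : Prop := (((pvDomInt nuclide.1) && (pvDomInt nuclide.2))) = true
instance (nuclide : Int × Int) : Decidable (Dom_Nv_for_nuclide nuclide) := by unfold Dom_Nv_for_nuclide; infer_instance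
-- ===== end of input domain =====

-- B replaces A's shell-by-shell filling loop by a binary search on the closed-form
-- cumulative shell capacity; objective: faster (fewer iterations per species).

-- ===== PORT A =====
-- A's inner while loop: discard particles shell by shell, tracking max eta reached.
-- eta is a Nat loop counter (in Python it starts at 0 and is only incremented).
def pvAloop (numParticles : Int) (eta : Nat) (Nv : Int) : Int :=
  if h : numParticles > 0 then
    let shellDegeneracy : Int := ((eta : Int) + 1) * ((eta : Int) + 2)
    let numParticlesInShell := min numParticles shellDegeneracy
    pvAloop (numParticles - numParticlesInShell) (eta + 1) (max Nv (eta : Int))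
  else Nv
termination_by numParticles.toNat
decreasing_by
  have h1 : (1 : Int) ≤ ((eta : Int) + 1) * ((eta : Int) + 2) := by
    have := Int.natCast_nonneg eta; nlinarith
  omega

def Nv_for_nuclide (nuclide : Int × Int) : Int :=
  pvAloop nuclide.2 0 (pvAloop nuclide.1 0 0)

-- ===== PORT B =====
-- B's binary search: smallest eta in [lo,hi] with (eta+1)*(eta+2)*(eta+3) >= 3*n.
def pvBsearch (n lo hi : Int) : Int :=
  if h : lo < hi then
    let mid := PySem.Int.floordiv (lo + hi) 2
    if (mid + 1) * (mid + 2) * (mid + 3) ≥ 3 * n then pvBsearch n lo mid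
    else pvBsearch n (mid + 1) hi
  else lo
termination_by (hi - lo).toNat
decreasing_by
  · have hm : PySem.Int.floordiv (lo + hi) 2 < hi :=
      (PySem.Int.floordiv_lt_iff_lt_mul (by omega)).mpr (by omega)
    omega
  · have hm : PySem.Int.floordiv (lo + hi) 2 < hi :=
      (PySem.Int.floordiv_lt_iff_lt_mul (by omega)).mpr (by omega)
    have hb := PySem.Int.floordiv_two_mid_bounds (le_of_lt h)
    omega

def Nv_for_nuclide_alt (nuclide : Int × Int) : Int :=
  [nuclide.1, nuclide.2].foldl
    (fun Nv numParticles =>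
      if numParticles > 0 then max Nv (pvBsearch numParticles 0 numParticles) else Nv) 0

-- ===== PRECONDITION & SPEC =====
def Spec_Nv_for_nuclide (nuclide : Int × Int) (out : Int) : Prop := out = Nv_for_nuclide_alt nuclide
instance (nuclide : Int × Int) (out : Int) : Decidable (Spec_Nv_for_nuclide nuclide out) := by unfold Spec_Nv_for_nuclide; infer_instance

-- ===== CLAIM (what is proved, stated in full; the proofs are below) =====
def Claim_equal_Nv_for_nuclide : Prop := ∀ (nuclide : Int × Int), Dom_Nv_for_nuclide nuclide → Spec_Nv_for_nuclide nuclide (Nv_for_nuclide nuclide)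

-- ===== LEMMAS AND PROOFS =====

-- 3 × (cumulative capacity of shells 0 .. x-1)
def pvT (x : Int) : Int := x * (x + 1) * (x + 2)

theorem cube_mono {a b : Int} (ha : 0 ≤ a) (hab : a ≤ b) :
    (a + 1) * (a + 2) * (a + 3) ≤ (b + 1) * (b + 2) * (b + 3) := by
  have h1 : (a + 1) * (a + 2) ≤ (b + 1) * (b + 2) := by nlinarith
  have h2 : (0 : Int) ≤ (b + 1) * (b + 2) := by nlinarith
  exact mul_le_mul h1 (by omega) (by omega) h2

-- Characterization of A's loop result: for positive n it returns max Nv j, where j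
-- is the first shell at which the cumulative capacity from shell eta reaches n.
theorem pvAloop_props (numParticles : Int) (eta : Nat) (Nv : Int) :
    0 < numParticles →
    ∃ j : Nat, eta ≤ j ∧
      pvAloop numParticles eta Nv = max Nv (j : Int) ∧
      3 * numParticles ≤ pvT ((j : Int) + 1) - pvT (eta : Int) ∧
      (∀ i : Nat, eta ≤ i → i < j → pvT ((i : Int) + 1) - pvT (eta : Int) < 3 * numParticles) := by
  fun_induction pvAloop numParticles eta Nv with
  | case1 n eta Nv h deg take ih =>
    have hdeg : deg = ((eta : Int) + 1) * ((eta : Int) + 2) := rfl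
    have htake : take = min n deg := rfl
    have hdegpos : (1 : Int) ≤ deg := by
      rw [hdeg]; have := Int.natCast_nonneg eta; nlinarith
    intro hn
    by_cases hfits : n ≤ deg
    · -- all remaining particles fit in this shell: next numParticles is 0, loop stops
      have hz : n - take = 0 := by omega
      rw [hz] at ih ⊢
      rw [pvAloop]
      simp only [show ¬((0:Int) > 0) by omega, dite_false]
      refine ⟨eta, le_refl _, rfl, ?_, fun i h1 h2 => absurd h2 (by omega)⟩
      have : pvT ((eta : Int) + 1) - pvT (eta : Int) = 3 * deg := by rw [hdeg]; unfold pvT; ring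
      omega
    · -- shell filled completely, recurse
      have htake' : take = deg := by omega
      obtain ⟨j, hj1, hj2, hj3, hj4⟩ := ih (by omega)
      refine ⟨j, by omega, ?_, ?_, ?_⟩
      · rw [hj2]
        have : ((eta : Int)) ≤ (j : Int) := by exact_mod_cast Nat.le_of_succ_le hj1
        omega
      · have hstep : pvT ((eta : Int) + 1) - pvT (eta : Int) = 3 * deg := by
          rw [hdeg]; unfold pvT; ring
        have hcast : ((eta + 1 : Nat) : Int) = (eta : Int) + 1 := by push_cast; ring
        rw [hcast] at hj3
        omega
      · intro i h1 h2
        by_cases hce : i = eta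
        · subst hce
          have : pvT ((i : Int) + 1) - pvT (i : Int) = 3 * deg := by rw [hdeg]; unfold pvT; ring
          omega
        · have hmem := hj4 i (by omega) h2
          have hstep : pvT ((eta : Int) + 1) - pvT (eta : Int) = 3 * deg := by
            rw [hdeg]; unfold pvT; ring
          have hcast : ((eta + 1 : Nat) : Int) = (eta : Int) + 1 := by push_cast; ring
          rw [hcast] at hmem
          omega
  | case2 n eta Nv h => intro hn; omega

-- Characterization of B's binary search result: the least point of the monotone test.
theorem pvBsearch_props (n lo hi : Int) :
    0 ≤ lo → lo ≤ hi → 3 * n ≤ (hi + 1) * (hi + 2) * (hi + 3) →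
    lo ≤ pvBsearch n lo hi ∧ pvBsearch n lo hi ≤ hi ∧
      3 * n ≤ (pvBsearch n lo hi + 1) * (pvBsearch n lo hi + 2) * (pvBsearch n lo hi + 3) ∧
      (∀ e : Int, lo ≤ e → e < pvBsearch n lo hi → (e + 1) * (e + 2) * (e + 3) < 3 * n) := by
  fun_induction pvBsearch n lo hi with
  | case1 lo hi h mid hcond ih =>
    intro h0 hle hhi
    have hb := PySem.Int.floordiv_two_mid_bounds (le_of_lt h)
    have hm : PySem.Int.floordiv (lo + hi) 2 < hi :=
      (PySem.Int.floordiv_lt_iff_lt_mul (by omega)).mpr (by omega)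
    obtain ⟨i1, i2, i3, i4⟩ := ih h0 (by omega) hcond
    exact ⟨i1, by omega, i3, i4⟩
  | case2 lo hi h mid hcond ih =>
    intro h0 hle hhi
    have hb := PySem.Int.floordiv_two_mid_bounds (le_of_lt h)
    have hm : PySem.Int.floordiv (lo + hi) 2 < hi :=
      (PySem.Int.floordiv_lt_iff_lt_mul (by omega)).mpr (by omega)
    obtain ⟨i1, i2, i3, i4⟩ := ih (by omega) (by omega) hhi
    refine ⟨by omega, i2, i3, ?_⟩
    intro e he her
    by_cases hcase : e ≤ mid
    · calc (e + 1) * (e + 2) * (e + 3) ≤ (mid + 1) * (mid + 2) * (mid + 3) :=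
            cube_mono (by omega) hcase
        _ < 3 * n := by omega
    · exact i4 e (by omega) her
  | case3 lo hi h =>
    intro h0 hle hhi
    have : lo = hi := by omega
    subst this
    exact ⟨le_refl _, le_refl _, hhi, fun e he her => absurd her (by omega)⟩

-- One species: A's filling loop equals B's per-species value.
theorem pvSpecies (n Nv : Int) :
    pvAloop n 0 Nv = if n > 0 then max Nv (pvBsearch n 0 n) else Nv := by
  by_cases hn : n > 0
  · rw [if_pos hn]
    obtain ⟨j, hj1, hj2, hj3, hj4⟩ := pvAloop_props n 0 Nv hn
    obtain ⟨b1, b2, b3, b4⟩ := pvBsearch_props n 0 n (le_refl 0) (by omega) (by nlinarith [mul_pos hn hn, mul_pos (mul_pos hn hn) hn])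
    have hT0 : pvT ((0 : Nat) : Int) = 0 := by unfold pvT; norm_num
    have hcube : ∀ x : Int, pvT (x + 1) = (x + 1) * (x + 2) * (x + 3) := fun x => by
      unfold pvT; ring
    have hj3' : 3 * n ≤ ((j : Int) + 1) * ((j : Int) + 2) * ((j : Int) + 3) := by
      rw [← hcube]; omega
    have heq : (j : Int) = pvBsearch n 0 n := by
      rcases lt_trichotomy ((j : Int)) (pvBsearch n 0 n) with hlt | he | hgt
      · have := b4 j (by positivity) hlt
        omega
      · exact he
      · have hnn : ((pvBsearch n 0 n).toNat : Int) = pvBsearch n 0 n := Int.toNat_of_nonneg b1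
        have := hj4 (pvBsearch n 0 n).toNat (by omega) (by omega)
        rw [hnn, hcube] at this
        omega
    rw [hj2, heq]
  · rw [if_neg hn, pvAloop]
    simp [hn]

-- ===== VERDICT (by name: the statement is the Claim_ definition above) =====
theorem Nv_for_nuclide_spec : Claim_equal_Nv_for_nuclide := by
  intro ⟨z, n⟩ _
  unfold Spec_Nv_for_nuclide Nv_for_nuclide Nv_for_nuclide_alt
  simp only [List.foldl]
  rw [pvSpecies n, pvSpecies z]
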